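-- pv_equiv track=rewrite | github.com/rolker/marine_ais | marine_ais_tools/src/ais/decoder.py | decodeSignedInt
-- ===== SOURCE A (Python) =====
-- def decodeUnsignedInt(bits):
--     ret = 0
--     for b in bits:
--         ret = ret << 1
--         if b:
--             ret = ret | 1
--     return ret
--
-- def decodeSignedInt(bits):
--     if not bits[0]: # positive
--         return decodeUnsignedInt(bits[1:])
--     # negative so two's complement
--     ret = 0
--     for b in bits:
--         ret = ret << 1
--         if not b:
--             ret = ret | 1
--     ret += 1
--     return -ret
-- ===== SOURCE B (Python) =====
-- def decodeSignedInt(bits):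
--     ret = 0
--     for b in bits:
--         ret = (ret << 1) | (1 if b else 0)
--     if bits[0]:
--         ret -= 1 << len(bits)
--     return ret
-- ===== Notes on version B (the rewrite author's own statement) =====
-- stated objective: simpler
-- what changed: Single unsigned-accumulation pass over all bits followed by a closed-form two's-complement correction (subtract 1<<n when the sign bit is set), replacing A's branch into a slice+helper positive path and an invert-bits-add-one negative path.
import Mathlib
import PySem

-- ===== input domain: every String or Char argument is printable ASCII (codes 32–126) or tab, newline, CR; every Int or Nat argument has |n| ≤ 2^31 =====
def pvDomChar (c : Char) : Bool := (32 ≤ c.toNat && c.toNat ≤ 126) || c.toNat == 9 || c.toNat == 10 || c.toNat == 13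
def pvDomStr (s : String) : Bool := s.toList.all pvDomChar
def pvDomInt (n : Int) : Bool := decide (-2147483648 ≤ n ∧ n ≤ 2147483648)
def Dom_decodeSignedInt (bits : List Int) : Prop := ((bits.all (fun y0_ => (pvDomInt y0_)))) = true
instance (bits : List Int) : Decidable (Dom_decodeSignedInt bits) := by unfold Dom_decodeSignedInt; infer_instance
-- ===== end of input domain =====

-- B: one unsigned-accumulation pass plus a closed-form sign correction, replacing A's two branches; simpler.
-- Both A and B raise IndexError on the empty list (bits[0]); Pre_ excludes exactly that input.
-- ===== PORT A =====
-- loop body of A's decodeUnsignedInt: `ret = ret << 1; if b: ret = ret | 1` (`| 1` on the even `ret * 2` is `+ 1`, exact)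
def stepUnsignedA (ret b : Int) : Int := let ret := ret * 2; if b ≠ 0 then ret + 1 else ret

def decodeUnsignedIntPortA (bits : List Int) : Int := bits.foldl stepUnsignedA 0

-- loop body of A's negative branch: `ret = ret << 1; if not b: ret = ret | 1`
def stepNegA (ret b : Int) : Int := let ret := ret * 2; if ¬ b ≠ 0 then ret + 1 else ret

def decodeSignedInt (bits : List Int) : Int :=
  match bits with
  | [] => 0  -- Python raises IndexError here; excluded by Pre_decodeSignedInt
  | b0 :: _ =>
    if b0 = 0 then decodeUnsignedIntPortA (bits.drop 1)  -- bits[1:]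
    else
      let ret := bits.foldl stepNegA 0; -(ret + 1)

-- ===== PORT B =====
-- loop body of B: `ret = (ret << 1) | (1 if b else 0)`
def stepB (ret b : Int) : Int := ret * 2 + (if b ≠ 0 then 1 else 0)

def decodeSignedInt_alt (bits : List Int) : Int :=
  let ret := bits.foldl stepB 0
  match bits with
  | [] => 0  -- Python raises IndexError (bits[0]); excluded by Pre_decodeSignedInt
  | b0 :: _ => if b0 ≠ 0 then ret - 2 ^ bits.length else ret

-- ===== PRECONDITION & SPEC =====
def Pre_decodeSignedInt (bits : List Int) : Prop := bits ≠ []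
instance (bits : List Int) : Decidable (Pre_decodeSignedInt bits) := by unfold Pre_decodeSignedInt; infer_instance
def pvWitness_decodeSignedInt : List Int := [1, 0, 1]
def Spec_decodeSignedInt (bits : List Int) (out : Int) : Prop := out = decodeSignedInt_alt bits
instance (bits : List Int) (out : Int) : Decidable (Spec_decodeSignedInt bits out) := by unfold Spec_decodeSignedInt; infer_instance

-- ===== CLAIM (what is proved, stated in full; the proofs are below) =====
def Claim_equal_decodeSignedInt : Prop := ∀ (bits : List Int), Dom_decodeSignedInt bits → Pre_decodeSignedInt bits → Spec_decodeSignedInt bits (decodeSignedInt bits)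

-- ===== LEMMAS AND PROOFS =====

-- A's positive-branch fold and B's fold agree from any accumulator
theorem foldA_eq_foldB (xs : List Int) : ∀ (a : Int),
    xs.foldl stepUnsignedA a = xs.foldl stepB a := by
  induction xs with
  | nil => intro a; rfl
  | cons x xs ih =>
    intro a
    simp only [List.foldl_cons, ih]
    have : stepUnsignedA a x = stepB a x := by
      simp only [stepUnsignedA, stepB]; split <;> ring
    rw [this]

-- B's fold and A's negative-branch (bit-flipping) fold sum to (aU + aW + 1) · 2^n − 1
theorem foldUW_sum_gen (xs : List Int) : ∀ (aU aW : Int),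
    xs.foldl stepB aU + xs.foldl stepNegA aW = (aU + aW + 1) * 2 ^ xs.length - 1 := by
  induction xs with
  | nil => intro aU aW; simp only [List.foldl_nil, List.length_nil, pow_zero]; ring
  | cons x xs ih =>
    intro aU aW
    simp only [List.foldl_cons, List.length_cons, ih]
    simp only [stepB, stepNegA]
    by_cases h : x = 0 <;> simp [h] <;> ring

-- ===== VERDICT (by name: the statement is the Claim_ definition above) =====
theorem decodeSignedInt_spec : Claim_equal_decodeSignedInt := by
  intro bits _ hpre
  unfold Spec_decodeSignedInt
  match bits with
  | [] => exact absurd rfl hpre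
  | b0 :: rest =>
    by_cases h0 : b0 = 0
    · have hA : decodeSignedInt (b0 :: rest) = decodeUnsignedIntPortA rest := by
        simp only [decodeSignedInt]
        rw [if_pos h0, List.drop_succ_cons, List.drop_zero]
      have hB : decodeSignedInt_alt (b0 :: rest) = rest.foldl stepB 0 := by
        simp only [decodeSignedInt_alt, List.foldl_cons]
        rw [if_neg (by simpa using h0)]
        have : stepB 0 b0 = 0 := by simp [stepB, h0]
        rw [this]
      rw [hA, hB]
      exact foldA_eq_foldB rest 0
    · have hA : decodeSignedInt (b0 :: rest) = -((b0 :: rest).foldl stepNegA 0 + 1) := by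
        simp only [decodeSignedInt]
        rw [if_neg h0]
      have hB : decodeSignedInt_alt (b0 :: rest)
          = (b0 :: rest).foldl stepB 0 - 2 ^ (b0 :: rest).length := by
        simp only [decodeSignedInt_alt]
        rw [if_pos h0]
      rw [hA, hB]
      have hsum := foldUW_sum_gen (b0 :: rest) 0 0
      linarith
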